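-- pv_equiv track=rewrite | github.com/fraim-ai/fraim-toolkit | tools/dna-graph.py | _scratchpad_summary
-- ===== SOURCE A (Python) =====
-- from collections import defaultdict
--
-- def _scratchpad_summary(entries):
--     """Return type-count string for active (non-matured) entries."""
--     active = [e for e in entries if not e.get("matured_to")]
--     if not active:
--         return ""
--     counts = defaultdict(int)
--     for e in active:
--         counts[e.get("type", "unknown")] += 1
--     parts = [f"{c} {t}(s)" for t, c in sorted(counts.items())]
--     return f"{len(active)} active — {', '.join(parts)}"
-- ===== SOURCE B (Python) =====
-- def _group_parts(types):
--     """Run-length encode an already-sorted list of type names into summary parts."""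
--     if not types:
--         return []
--     t = types[0]
--     run = 1
--     while run < len(types) and types[run] == t:
--         run += 1
--     return [f"{run} {t}(s)"] + _group_parts(types[run:])
--
-- def _scratchpad_summary(entries):
--     """Return type-count string for active (non-matured) entries."""
--     active = [e for e in entries if not e.get("matured_to")]
--     if not active:
--         return ""
--     parts = _group_parts(sorted(e.get("type", "unknown") for e in active))
--     return f"{len(active)} active — {', '.join(parts)}"
-- ===== Notes on version B (the rewrite author's own statement) =====
-- stated objective: alternative
-- what changed: Replaces A's hash-accumulate (defaultdict count loop) then sort-the-keys with sort-then-group: the type names are sorted once and a recursive run-length grouping walks consecutive equal runs, emitting one part per run; no count table is ever built.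
import Mathlib
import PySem

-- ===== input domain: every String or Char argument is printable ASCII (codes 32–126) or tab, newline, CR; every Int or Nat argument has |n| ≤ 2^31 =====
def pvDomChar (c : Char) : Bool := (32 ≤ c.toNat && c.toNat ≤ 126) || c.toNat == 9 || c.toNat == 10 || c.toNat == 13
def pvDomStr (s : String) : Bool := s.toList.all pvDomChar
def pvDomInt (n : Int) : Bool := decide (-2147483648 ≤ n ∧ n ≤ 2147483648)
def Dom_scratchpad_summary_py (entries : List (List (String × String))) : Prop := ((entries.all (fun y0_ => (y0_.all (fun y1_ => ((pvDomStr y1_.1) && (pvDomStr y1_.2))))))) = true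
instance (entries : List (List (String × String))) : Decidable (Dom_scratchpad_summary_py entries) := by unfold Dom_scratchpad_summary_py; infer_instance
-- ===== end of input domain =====

-- B replaces A's defaultdict counting by sorting the type names once and run-length grouping consecutive equal runs recursively (alternative algorithm; not claimed faster).


-- ===== PORT A =====
def scratchpad_summary_py (entries : List (List (String × String))) : String :=
  let active := entries.filter (fun e => ((PySem.Dict.ofList e).getD "matured_to" "") == "")
  if active = [] then ""
  else
    let counts : PySem.Dict String Int :=
      active.foldl (fun d e => d.modify ((PySem.Dict.ofList e).getD "type" "unknown") 0 (· + 1)) PySem.Dict.empty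
    let parts := (PySem.List.sorted2 counts.items Prod.fst Prod.snd).map
      (fun tc => PySem.Int.toStr tc.2 ++ " " ++ tc.1 ++ "(s)")
    PySem.Int.toStr (active.length : Int) ++ " active — " ++ PySem.Str.join ", " parts

-- ===== PORT B =====
-- _group_parts: the inner 'while' counts the leading run of types[0] (= takeWhile length),
-- and 'types[run:]' drops exactly that run (= dropWhile); then it recurses on the remainder.
def pvGroupParts : List String → List String
  | [] => []
  | t :: rest =>
    let run : Nat := 1 + (rest.takeWhile (fun x => x == t)).length
    (PySem.Int.toStr (run : Int) ++ " " ++ t ++ "(s)")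
      :: pvGroupParts (rest.dropWhile (fun x => x == t))
termination_by l => l.length
decreasing_by
  simp only [List.length_cons]
  exact Nat.lt_succ_of_le (List.length_dropWhile_le _ _)

def scratchpad_summary_py_alt (entries : List (List (String × String))) : String :=
  let active := entries.filter (fun e => ((PySem.Dict.ofList e).getD "matured_to" "") == "")
  if active = [] then ""
  else
    let parts := pvGroupParts
      (PySem.List.sorted (active.map (fun e => (PySem.Dict.ofList e).getD "type" "unknown")) (fun t => t))
    PySem.Int.toStr (active.length : Int) ++ " active — " ++ PySem.Str.join ", " parts

-- ===== PRECONDITION & SPEC =====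
def Spec_scratchpad_summary_py (entries : List (List (String × String))) (out : String) : Prop := out = scratchpad_summary_py_alt entries
instance (entries : List (List (String × String))) (out : String) : Decidable (Spec_scratchpad_summary_py entries out) := by unfold Spec_scratchpad_summary_py; infer_instance

-- ===== CLAIM (what is proved, stated in full; the proofs are below) =====
def Claim_equal_scratchpad_summary_py : Prop := ∀ (entries : List (List (String × String))), Dom_scratchpad_summary_py entries → Spec_scratchpad_summary_py entries (scratchpad_summary_py entries)

-- ===== LEMMAS AND PROOFS =====

-- insertBy only ever compares the inserted element against members of the list.
theorem pv_insertBy_congr {α : Type} (b₁ b₂ : α → α → Bool) (x : α) (l : List α)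
    (h : ∀ y ∈ l, b₁ x y = b₂ x y) :
    PySem.List.insertBy b₁ x l = PySem.List.insertBy b₂ x l := by
  induction l with
  | nil => rfl
  | cons y ys ih =>
    simp only [PySem.List.insertBy]
    rw [h y (by simp)]
    by_cases hb : b₂ x y = true
    · simp [hb]
    · simp only [Bool.not_eq_true] at hb
      simp [hb]
      exact ih (fun z hz => h z (by simp [hz]))

-- an insertion-sort fold is determined by the comparison's values on the involved elements
theorem pv_foldl_insertBy_congr {α : Type} (b₁ b₂ : α → α → Bool) :
    ∀ (xs acc : List α),
      (∀ a b : α, (a ∈ acc ∨ a ∈ xs) → (b ∈ acc ∨ b ∈ xs) → b₁ a b = b₂ a b) →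
      xs.foldl (fun acc x => PySem.List.insertBy b₁ x acc) acc
        = xs.foldl (fun acc x => PySem.List.insertBy b₂ x acc) acc := by
  intro xs
  induction xs with
  | nil => intro acc _; rfl
  | cons x xs ih =>
    intro acc h
    simp only [List.foldl_cons]
    rw [pv_insertBy_congr b₁ b₂ x acc
      (fun y hy => h x y (Or.inr (by simp)) (Or.inl hy))]
    refine ih _ (fun a b ha hb => h a b ?_ ?_)
    · rcases ha with ha | ha
      · rcases (PySem.List.mem_insertBy _ _ _ _).1 ha with h' | h'
        · exact Or.inr (by simp [h'])
        · exact Or.inl h'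
      · exact Or.inr (by simp [ha])
    · rcases hb with hb | hb
      · rcases (PySem.List.mem_insertBy _ _ _ _).1 hb with h' | h'
        · exact Or.inr (by simp [h'])
        · exact Or.inl h'
      · exact Or.inr (by simp [hb])

-- sorted2 with reverse = false, unfolded to its insertion fold (definitional)
theorem pv_sorted2_eq_foldl {α κ₁ κ₂ : Type} [LT κ₁] [DecidableLT κ₁] [LT κ₂] [DecidableLT κ₂]
    (xs : List α) (k1 : α → κ₁) (k2 : α → κ₂) :
    PySem.List.sorted2 xs k1 k2 false
      = xs.foldl (fun acc x => PySem.List.insertBy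
          (fun a b => decide (k1 a < k1 b) || (!decide (k1 b < k1 a) && decide (k2 a < k2 b))) x acc) [] := rfl

-- A's sorted(counter.items()) is the sorted distinct types paired with their counts
theorem pv_sorted2_counter (ts : List String) :
    PySem.List.sorted2 (PySem.Dict.counter ts).items Prod.fst Prod.snd
      = (PySem.List.sorted (PySem.Set.ofList ts) (fun t => t)).map
          (fun k => (k, (ts.count k : Int))) := by
  rw [PySem.Dict.items_counter]
  have hstep1 :
      PySem.List.sorted2 ((PySem.Set.ofList ts).map (fun k => (k, (ts.count k : Int)))) Prod.fst Prod.snd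
        = PySem.List.sorted ((PySem.Set.ofList ts).map (fun k => (k, (ts.count k : Int)))) Prod.fst := by
    rw [pv_sorted2_eq_foldl, PySem.List.sorted_eq_foldl_insertBy]
    apply pv_foldl_insertBy_congr
    intro a b ha hb
    simp only [List.not_mem_nil, false_or] at ha hb
    obtain ⟨ka, -, rfl⟩ := List.mem_map.1 ha
    obtain ⟨kb, -, rfl⟩ := List.mem_map.1 hb
    by_cases h1 : ka < kb
    · simp [h1]
    · by_cases h2 : kb < ka
      · simp [h1, h2]
      · have : ka = kb := le_antisymm (not_lt.1 h2) (not_lt.1 h1)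
        subst this
        simp
  rw [hstep1]
  exact PySem.List.sorted_eq_of_perm_of_pairwise_lt _ _ _
    ((PySem.List.sorted_perm _ _ _).map _)
    (List.pairwise_map.mpr (by simpa using PySem.List.sorted_ofList_pairwise_lt ts))

-- set(xs) (first occurrences) is a sublist of xs
theorem pv_ofList_sublist {α : Type} [BEq α] [LawfulBEq α] (xs : List α) :
    (PySem.Set.ofList xs).Sublist xs := by
  induction xs with
  | nil => simp [PySem.Set.ofList_nil]
  | cons x xs ih =>
    rw [PySem.Set.ofList_cons]
    exact List.Sublist.cons₂ x (List.filter_sublist.trans ih)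

-- in a ≤-sorted list whose elements are all ≥ t, everything after the leading run of t differs from t
theorem pv_dropWhile_ne (t : String) :
    ∀ (l : List String), l.Pairwise (· ≤ ·) → (∀ x ∈ l, t ≤ x) →
      ∀ y ∈ l.dropWhile (fun x => x == t), y ≠ t := by
  intro l
  induction l with
  | nil => intro _ _ y hy; simp at hy
  | cons x xs ih =>
    intro hp hge y hy
    rcases List.pairwise_cons.1 hp with ⟨hx, hxs⟩
    by_cases hxt : (x == t) = true
    · rw [List.dropWhile_cons, if_pos hxt] at hy
      exact ih hxs (fun z hz => hge z (by simp [hz])) y hy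
    · rw [List.dropWhile_cons, if_neg hxt] at hy
      have hxt' : x ≠ t := by simpa using hxt
      have htx : t < x := lt_of_le_of_ne (hge x (by simp)) (Ne.symm hxt')
      rcases List.mem_cons.1 hy with rfl | hy'
      · exact hxt'
      · exact fun hEq => absurd (hEq ▸ hx y hy') (not_le.2 htx)

-- removing t from set(l) is set(l with its leading run of t dropped), when t does not recur later
theorem pv_discard_ofList (t : String) :
    ∀ (l : List String), (∀ y ∈ l.dropWhile (fun x => x == t), y ≠ t) →
      PySem.Set.discard (PySem.Set.ofList l) t
        = PySem.Set.ofList (l.dropWhile (fun x => x == t)) := by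
  intro l
  induction l with
  | nil => intro _; rfl
  | cons x xs ih =>
    intro h
    by_cases hxt : (x == t) = true
    · have hx : x = t := by simpa using hxt
      rw [List.dropWhile_cons, if_pos hxt] at h ⊢
      rw [PySem.Set.ofList_cons, hx]
      show List.filter _ (t :: List.filter _ _) = _
      rw [List.filter_cons_of_neg (by simp), List.filter_filter]
      simpa [PySem.Set.discard, Bool.and_self] using ih h
    · rw [List.dropWhile_cons, if_neg hxt] at h ⊢
      have : ∀ y ∈ PySem.Set.ofList (x :: xs), (!(y == t)) = true := by
        intro y hy
        have := h y ((PySem.Set.mem_ofList _ _).1 hy)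
        simpa using this
      simpa [PySem.Set.discard] using List.filter_eq_self.2 this

-- run-length grouping of a ≤-sorted list = formatted counts over its distinct elements in order
theorem pv_groupParts_sorted (s : List String) :
    s.Pairwise (· ≤ ·) →
    pvGroupParts s
      = (PySem.Set.ofList s).map (fun k => PySem.Int.toStr ((s.count k : Nat) : Int) ++ " " ++ k ++ "(s)") := by
  induction s using pvGroupParts.induct with
  | case1 => intro _; simp [pvGroupParts]
  | case2 t rest ih =>
    intro hs
    rcases List.pairwise_cons.1 hs with ⟨hall, hrest⟩
    have hdw := pv_dropWhile_ne t rest hrest hall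
    have htw : ∀ x ∈ rest.takeWhile (fun x => x == t), x = t := by
      intro x hx
      simpa using List.mem_takeWhile_imp hx
    -- count of t
    have hcount_t : (t :: rest).count t = 1 + (rest.takeWhile (fun x => x == t)).length := by
      rw [List.count_cons_self]
      have hsplit : rest = rest.takeWhile (fun x => x == t) ++ rest.dropWhile (fun x => x == t) :=
        (List.takeWhile_append_dropWhile).symm
      have : rest.count t = (rest.takeWhile (fun x => x == t)).length := by
        conv_lhs => rw [hsplit]
        rw [List.count_append, List.count_eq_zero.2 (fun h => (hdw t h) rfl),
          List.count_eq_length.2 (fun b hb => by simp [htw b hb]), Nat.add_zero]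
      omega
    -- the distinct elements
    have hset : PySem.Set.ofList (t :: rest)
        = t :: PySem.Set.ofList (rest.dropWhile (fun x => x == t)) := by
      rw [PySem.Set.ofList_cons]
      congr 1
      have : PySem.Set.discard (PySem.Set.ofList rest) t
          = PySem.Set.ofList (rest.dropWhile (fun x => x == t)) := pv_discard_ofList t rest hdw
      exact this
    -- counts of the other distinct elements
    have hcount_k : ∀ k ∈ PySem.Set.ofList (rest.dropWhile (fun x => x == t)),
        (t :: rest).count k = (rest.dropWhile (fun x => x == t)).count k := by
      intro k hk
      have hk' : k ∈ rest.dropWhile (fun x => x == t) := (PySem.Set.mem_ofList _ _).1 hk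
      have hkt : k ≠ t := hdw k hk'
      rw [List.count_cons_of_ne hkt.symm]
      conv_lhs => rw [(List.takeWhile_append_dropWhile
        (p := fun x => x == t) (l := rest)).symm]
      rw [List.count_append, List.count_eq_zero.2 (fun h => hkt ((htw k h).symm ▸ rfl)), Nat.zero_add]
    have hdwp : (rest.dropWhile (fun x => x == t)).Pairwise (· ≤ ·) :=
      hrest.sublist (List.dropWhile_sublist _)
    rw [pvGroupParts, hset, List.map_cons, ← hcount_t]
    congr 1
    rw [ih hdwp]
    exact (List.map_congr_left (fun k hk => by rw [hcount_k k hk])).symm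

-- ===== VERDICT (by name: the statement is the Claim_ definition above) =====
theorem scratchpad_summary_py_spec : Claim_equal_scratchpad_summary_py := by
  intro entries _
  unfold Spec_scratchpad_summary_py scratchpad_summary_py scratchpad_summary_py_alt
  dsimp only
  split_ifs with h
  · rfl
  · have hc :
        (entries.filter (fun e => ((PySem.Dict.ofList e).getD "matured_to" "") == "")).foldl
            (fun d e => d.modify ((PySem.Dict.ofList e).getD "type" "unknown") 0 (· + 1)) PySem.Dict.empty
          = PySem.Dict.counter
              ((entries.filter (fun e => ((PySem.Dict.ofList e).getD "matured_to" "") == "")).map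
                (fun e => (PySem.Dict.ofList e).getD "type" "unknown")) := by
      rw [PySem.Dict.counter_eq_foldl, List.foldl_map]
    set types := (entries.filter (fun e => ((PySem.Dict.ofList e).getD "matured_to" "") == "")).map
      (fun e => (PySem.Dict.ofList e).getD "type" "unknown") with htypes
    have hB : pvGroupParts (PySem.List.sorted types (fun t => t))
        = (PySem.Set.ofList (PySem.List.sorted types (fun t => t))).map
            (fun k => PySem.Int.toStr (((PySem.List.sorted types (fun t => t)).count k : Nat) : Int) ++ " " ++ k ++ "(s)") :=
      pv_groupParts_sorted _ (PySem.List.sorted_pairwise types (fun t => t))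
    have hperm : (PySem.List.sorted types (fun t => t)).Perm types := PySem.List.sorted_perm _ _ _
    have hsetEq : PySem.List.sorted (PySem.Set.ofList types) (fun t => t)
        = PySem.Set.ofList (PySem.List.sorted types (fun t => t)) := by
      apply PySem.List.sorted_eq_of_perm_of_pairwise_lt
      · exact (List.perm_ext_iff_of_nodup (PySem.Set.nodup_ofList _) (PySem.Set.nodup_ofList _)).2
          (fun a => by simp [PySem.Set.mem_ofList, hperm.mem_iff])
      · have hle : (PySem.Set.ofList (PySem.List.sorted types (fun t => t))).Pairwise (· ≤ ·) :=
          (PySem.List.sorted_pairwise types (fun t => t)).sublist (pv_ofList_sublist _)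
        have hne : (PySem.Set.ofList (PySem.List.sorted types (fun t => t))).Pairwise (· ≠ ·) :=
          PySem.Set.nodup_ofList _
        exact (hle.and hne).imp (fun h => lt_of_le_of_ne h.1 h.2)
    have hmaps : List.map ((fun tc : String × Int => PySem.Int.toStr tc.2 ++ " " ++ tc.1 ++ "(s)") ∘
          fun k => (k, (types.count k : Int))) (PySem.Set.ofList (PySem.List.sorted types (fun t => t)))
        = List.map (fun k => PySem.Int.toStr (((PySem.List.sorted types (fun t => t)).count k : Nat) : Int)
            ++ " " ++ k ++ "(s)") (PySem.Set.ofList (PySem.List.sorted types (fun t => t))) :=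
      List.map_congr_left (fun k _ => by simp [Function.comp, hperm.count_eq])
    rw [hc, pv_sorted2_counter, List.map_map, hsetEq, hmaps, ← hB]
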